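-- pv_equiv track=rewrite | github.com/localstack/localstack | localstack/utils/bootstrap.py | resolve_apis
-- ===== SOURCE A (Python) =====
-- from typing import Any, Callable, Dict, Iterable, List, Optional, Set, Union
--
-- API_DEPENDENCIES = {
--     "dynamodb": ["dynamodbstreams"],
--     "dynamodbstreams": ["kinesis"],
--     "es": ["opensearch"],
--     "cloudformation": ["s3", "sts"],
--     "lambda": ["s3", "sqs", "sts"],
--     "firehose": ["kinesis"],
--     "transcribe": ["s3"],
-- }
--
-- API_COMPOSITES = {
--     "serverless": [
--         "cloudformation",
--         "cloudwatch",
--         "iam",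
--         "sts",
--         "lambda",
--         "dynamodb",
--         "apigateway",
--         "s3",
--     ],
--     "cognito": ["cognito-idp", "cognito-identity"],
-- }
--
-- def resolve_apis(services: Iterable[str]) -> Set[str]:
--     """
--     Resolves recursively for the given collection of services (e.g., ["serverless", "cognito"]) the list of actual
--     API services that need to be included (e.g., {'dynamodb', 'cloudformation', 'logs', 'kinesis', 'sts',
--     'cognito-identity', 's3', 'dynamodbstreams', 'apigateway', 'cloudwatch', 'lambda', 'cognito-idp', 'iam'}).
--
--     More specifically, it does this by:
--     (1) resolving and adding dependencies (e.g., "dynamodbstreams" requires "kinesis"),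
--     (2) resolving and adding composites (e.g., "serverless" describes an ensemble
--             including "iam", "lambda", "dynamodb", "apigateway", "s3", "sns", and "logs"), and
--     (3) removing duplicates from the list.
--
--     :param services: a collection of services that can include composites (e.g., "serverless").
--     :returns a set of canonical service names
--     """
--     stack = []
--     result = set()
--
--     # perform a graph search
--     stack.extend(services)
--     while stack:
--         service = stack.pop()
--
--         if service in result:
--             continue
--
--         # resolve composites (like "serverless"), but do not add it to the list of results
--         if service in API_COMPOSITES:
--             stack.extend(API_COMPOSITES[service])
--             continue
--
--         result.add(service)
--
--         # add dependencies to stack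
--         if service in API_DEPENDENCIES:
--             stack.extend(API_DEPENDENCIES[service])
--
--     return result
-- ===== SOURCE B (Python) =====
-- # The dependency/composite graph is a fixed module constant, so B precomputes the
-- # transitive closure of every known service name once; resolve_apis is then just a
-- # union of table lookups (no graph traversal at runtime).
--
-- _CLOSURES = {
--     "serverless": [
--         "cloudformation", "s3", "sts", "cloudwatch", "iam", "lambda", "sqs",
--         "dynamodb", "dynamodbstreams", "kinesis", "apigateway",
--     ],
--     "cognito": ["cognito-idp", "cognito-identity"],
--     "dynamodb": ["dynamodb", "dynamodbstreams", "kinesis"],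
--     "dynamodbstreams": ["dynamodbstreams", "kinesis"],
--     "es": ["es", "opensearch"],
--     "cloudformation": ["cloudformation", "s3", "sts"],
--     "lambda": ["lambda", "s3", "sqs", "sts"],
--     "firehose": ["firehose", "kinesis"],
--     "transcribe": ["transcribe", "s3"],
-- }
--
--
-- def resolve_apis(services):
--     """Union of precomputed transitive closures; unknown names resolve to themselves."""
--     result = set()
--     for s in services:
--         result.update(_CLOSURES.get(s, (s,)))
--     return result
-- ===== Notes on version B (the rewrite author's own statement) =====
-- stated objective: alternative
-- what changed: Replaces A's runtime graph search (explicit-stack DFS over dependencies and composites) with a precomputed transitive-closure table of the fixed constant graph: the result is just the union of table lookups, with unknown names mapping to themselves.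
import Mathlib
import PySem

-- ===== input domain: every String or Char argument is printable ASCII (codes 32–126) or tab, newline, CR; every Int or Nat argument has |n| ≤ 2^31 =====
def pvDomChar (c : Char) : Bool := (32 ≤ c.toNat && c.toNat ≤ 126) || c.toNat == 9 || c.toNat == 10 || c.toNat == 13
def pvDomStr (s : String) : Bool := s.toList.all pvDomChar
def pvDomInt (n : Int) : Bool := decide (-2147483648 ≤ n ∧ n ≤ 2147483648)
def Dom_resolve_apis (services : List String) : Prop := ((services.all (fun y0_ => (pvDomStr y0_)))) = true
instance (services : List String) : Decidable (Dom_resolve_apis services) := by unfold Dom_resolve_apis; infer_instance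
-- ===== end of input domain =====

-- B replaces A's runtime graph search (explicit-stack DFS) with a precomputed transitive-closure
-- table of the fixed constant graph: the result is a union of table lookups (objective: alternative).
-- Python returns a SET (unordered); both ports return its elements as the sorted list, the
-- canonical list representation of that set (outputs are compared as finite sets).

-- ===== PORT A =====
-- the module-level constant dicts (dict literals = sequential inserts)
def apiDependencies : PySem.Dict String (List String) :=
  (((((((PySem.Dict.empty.insert "dynamodb" ["dynamodbstreams"]).insert
    "dynamodbstreams" ["kinesis"]).insert
    "es" ["opensearch"]).insert
    "cloudformation" ["s3", "sts"]).insert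
    "lambda" ["s3", "sqs", "sts"]).insert
    "firehose" ["kinesis"]).insert
    "transcribe" ["s3"])

def apiComposites : PySem.Dict String (List String) :=
  ((PySem.Dict.empty.insert "serverless"
      ["cloudformation", "cloudwatch", "iam", "sts", "lambda", "dynamodb", "apigateway", "s3"]).insert
    "cognito" ["cognito-idp", "cognito-identity"])

-- termination weight: an upper bound on the work a service name can cause
def wS (s : String) : Nat :=
  if s = "serverless" then 16
  else if s = "lambda" then 4
  else if s = "dynamodb" ∨ s = "cloudformation" ∨ s = "cognito" then 3
  else if s = "dynamodbstreams" ∨ s = "es" ∨ s = "firehose" ∨ s = "transcribe" then 2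
  else 1

theorem wS_pos (s : String) : 1 ≤ wS s := by
  unfold wS; split_ifs <;> omega

theorem deps_get (s : String) :
    apiDependencies.get? s =
      if s = "transcribe" then some ["s3"]
      else if s = "firehose" then some ["kinesis"]
      else if s = "lambda" then some ["s3", "sqs", "sts"]
      else if s = "cloudformation" then some ["s3", "sts"]
      else if s = "es" then some ["opensearch"]
      else if s = "dynamodbstreams" then some ["kinesis"]
      else if s = "dynamodb" then some ["dynamodbstreams"]
      else none := by
  simp [apiDependencies, PySem.Dict.get?_insert, PySem.Dict.get?_empty]

theorem comp_get (s : String) :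
    apiComposites.get? s =
      if s = "cognito" then some ["cognito-idp", "cognito-identity"]
      else if s = "serverless" then
        some ["cloudformation", "cloudwatch", "iam", "sts", "lambda", "dynamodb", "apigateway", "s3"]
      else none := by
  simp [apiComposites, PySem.Dict.get?_insert, PySem.Dict.get?_empty]

theorem comp_w {s : String} {ms : List String} (h : apiComposites.get? s = some ms) :
    (ms.map wS).sum < wS s := by
  rw [comp_get] at h
  split_ifs at h with h1 h2
  · injection h with h; subst h; subst h1; decide
  · injection h with h; subst h; subst h2; decide

theorem deps_w {s : String} {ds : List String} (h : apiDependencies.get? s = some ds) :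
    (ds.map wS).sum < wS s := by
  rw [deps_get] at h
  split_ifs at h with h1 h2 h3 h4 h5 h6 h7
  · injection h with h; subst h; subst h1; decide
  · injection h with h; subst h; subst h2; decide
  · injection h with h; subst h; subst h3; decide
  · injection h with h; subst h; subst h4; decide
  · injection h with h; subst h; subst h5; decide
  · injection h with h; subst h; subst h6; decide
  · injection h with h; subst h; subst h7; decide

-- the while-loop of A: the Python list used as a stack is modelled with its TOP at the HEAD,
-- so stack.extend(xs) pushes xs.reverse and stack.pop() takes the head (exact for a LIFO stack)
def resolveLoop (stack : List String) (result : PySem.Set String) : PySem.Set String :=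
  match stack with
  | [] => result
  | service :: rest =>
    if PySem.Set.contains result service then
      resolveLoop rest result
    else
      match _h : apiComposites.get? service with
      | some members => resolveLoop (members.reverse ++ rest) result
      | none =>
        let result2 := PySem.Set.add result service
        match _h2 : apiDependencies.get? service with
        | some deps => resolveLoop (deps.reverse ++ rest) result2
        | none => resolveLoop rest result2
termination_by (stack.map wS).sum
decreasing_by
  · simp only [List.map_cons, List.sum_cons]
    have := wS_pos service; omega
  · simp only [List.map_cons, List.sum_cons, List.map_append, List.map_reverse,
      List.sum_append, List.sum_reverse]
    have := comp_w _h; omega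
  · simp only [List.map_cons, List.sum_cons, List.map_append, List.map_reverse,
      List.sum_append, List.sum_reverse]
    have := deps_w _h2; omega
  · simp only [List.map_cons, List.sum_cons]
    have := wS_pos service; omega

def resolve_apis (services : List String) : List String :=
  PySem.List.sorted (resolveLoop services.reverse PySem.Set.empty) (fun x => x) false

-- ===== PORT B =====
-- the precomputed closure table _CLOSURES of Source B; _CLOSURES.get(s, (s,)) is the else-branch [s]
def closTable (s : String) : List String :=
  if s = "serverless" then
    ["cloudformation", "s3", "sts", "cloudwatch", "iam", "lambda", "sqs",
     "dynamodb", "dynamodbstreams", "kinesis", "apigateway"]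
  else if s = "cognito" then ["cognito-idp", "cognito-identity"]
  else if s = "dynamodb" then ["dynamodb", "dynamodbstreams", "kinesis"]
  else if s = "dynamodbstreams" then ["dynamodbstreams", "kinesis"]
  else if s = "es" then ["es", "opensearch"]
  else if s = "cloudformation" then ["cloudformation", "s3", "sts"]
  else if s = "lambda" then ["lambda", "s3", "sqs", "sts"]
  else if s = "firehose" then ["firehose", "kinesis"]
  else if s = "transcribe" then ["transcribe", "s3"]
  else [s]

-- result.update(...) for each input service, then the set as a sorted list
def resolve_apis_alt (services : List String) : List String :=
  PySem.List.sorted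
    (services.foldl (fun result s => PySem.Set.update result (closTable s)) PySem.Set.empty)
    (fun x => x) false

-- ===== PRECONDITION & SPEC =====
def Spec_resolve_apis (services : List String) (out : List String) : Prop := out = resolve_apis_alt services
instance (services : List String) (out : List String) : Decidable (Spec_resolve_apis services out) := by unfold Spec_resolve_apis; infer_instance

-- ===== CLAIM (what is proved, stated in full; the proofs are below) =====
def Claim_equal_resolve_apis : Prop := ∀ (services : List String), Dom_resolve_apis services → Spec_resolve_apis services (resolve_apis services)

-- ===== LEMMAS AND PROOFS =====

theorem mem_le_sum {x : String} {xs : List String} (h : x ∈ xs) : wS x ≤ (xs.map wS).sum := by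
  induction xs with
  | nil => cases h
  | cons y ys ih =>
    cases h with
    | head => simp
    | tail _ h =>
      simp only [List.map_cons, List.sum_cons]
      exact le_trans (ih h) (Nat.le_add_left _ _)

-- is the service a composite / what are its dependencies
def isComp (s : String) : Bool := (apiComposites.get? s).isSome
def depsOf (s : String) : List String := (apiDependencies.get? s).getD []

-- the transitive closure of one service name (the set both programs add for it)
def clos (s : String) : List String :=
  match _h : apiComposites.get? s with
  | some ms => ms.attach.flatMap (fun m => clos m.1)
  | none => s :: (depsOf s).attach.flatMap (fun d => clos d.1)
termination_by wS s
decreasing_by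
  · exact lt_of_le_of_lt (mem_le_sum m.2) (comp_w _h)
  · obtain ⟨d, hd⟩ := d
    simp only [depsOf] at hd
    cases h2 : apiDependencies.get? s with
    | none => rw [h2] at hd; simp at hd
    | some ds => rw [h2] at hd; exact lt_of_le_of_lt (mem_le_sum hd) (deps_w h2)

-- invariant: every member of the result is a non-composite whose dependencies are either
-- already in the result or still pending
def Good (R P : List String) : Prop :=
  ∀ r ∈ R, isComp r = false ∧ ∀ d ∈ depsOf r, d ∈ R ∨ d ∈ P

-- the entry obligations of a service: its leaf entry points are in R
def entry (s : String) (R : List String) : Prop :=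
  match apiComposites.get? s with
  | some ms => ∀ m ∈ ms, m ∈ R
  | none => s ∈ R

theorem deps_noncomp {r d : String} (h : d ∈ depsOf r) : isComp d = false := by
  unfold depsOf at h
  rw [deps_get] at h
  split_ifs at h
  · simp at h; subst h; decide
  · simp at h; subst h; decide
  · simp at h; rcases h with rfl | rfl | rfl <;> decide
  · simp at h; rcases h with rfl | rfl <;> decide
  · simp at h; subst h; decide
  · simp at h; subst h; decide
  · simp at h; subst h; decide
  · simp at h

theorem members_noncomp {s m : String} {ms : List String}
    (h : apiComposites.get? s = some ms) (hm : m ∈ ms) : isComp m = false := by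
  rw [comp_get] at h
  split_ifs at h with h1 h2
  · injection h with h; subst h
    simp at hm; rcases hm with rfl | rfl <;> decide
  · injection h with h; subst h
    simp at hm; rcases hm with rfl | rfl | rfl | rfl | rfl | rfl | rfl | rfl <;> decide

theorem clos_comp {s : String} {ms : List String} (h : apiComposites.get? s = some ms) (x : String) :
    x ∈ clos s ↔ ∃ m ∈ ms, x ∈ clos m := by
  rw [clos]; rw [h]
  simp [List.mem_flatMap]

theorem clos_leaf {s : String} (h : apiComposites.get? s = none) (x : String) :
    x ∈ clos s ↔ x = s ∨ ∃ d ∈ depsOf s, x ∈ clos d := by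
  rw [clos]; rw [h]
  simp [List.mem_flatMap, eq_comm]

theorem entry_comp {s : String} {ms : List String} (h : apiComposites.get? s = some ms) {R : List String} :
    entry s R ↔ ∀ m ∈ ms, m ∈ R := by
  unfold entry; rw [h]

theorem entry_leaf {s : String} (h : apiComposites.get? s = none) {R : List String} :
    entry s R ↔ s ∈ R := by
  unfold entry; rw [h]

theorem entry_of_noncomp {s : String} (h : isComp s = false) {R : List String} (hm : s ∈ R) :
    entry s R := by
  unfold isComp at h
  cases hc : apiComposites.get? s with
  | none => exact (entry_leaf hc).2 hm
  | some ms => rw [hc] at h; simp at h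

-- closures stay inside a closed set that satisfies the entry obligations
theorem clos_closed : ∀ (n : Nat) (s : String) (R : List String), wS s ≤ n →
    Good R [] → entry s R → ∀ x ∈ clos s, x ∈ R := by
  intro n
  induction n with
  | zero => intro s R hle; have := wS_pos s; omega
  | succ n ih =>
    intro s R hle hg he x hx
    cases hc : apiComposites.get? s with
    | some ms =>
      rw [clos_comp hc] at hx
      obtain ⟨m, hm, hxm⟩ := hx
      have hmle : wS m ≤ n := by
        have := lt_of_le_of_lt (mem_le_sum hm) (comp_w hc); omega
      exact ih m R hmle hg
        (entry_of_noncomp (members_noncomp hc hm) ((entry_comp hc).1 he m hm)) x hxm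
    | none =>
      rw [clos_leaf hc] at hx
      have hsR : s ∈ R := (entry_leaf hc).1 he
      rcases hx with rfl | ⟨d, hd, hxd⟩
      · exact hsR
      · have hdR : d ∈ R := by
          rcases (hg s hsR).2 d hd with h | h
          · exact h
          · simp at h
        have hdle : wS d ≤ n := by
          have h2 : apiDependencies.get? s = some (depsOf s) := by
            unfold depsOf at hd ⊢
            cases hq : apiDependencies.get? s with
            | none => rw [hq] at hd; simp at hd
            | some ds => rfl
          have := lt_of_le_of_lt (mem_le_sum hd) (deps_w h2); omega
        exact ih d R hdle hg (entry_of_noncomp (deps_noncomp hd) hdR) x hxd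

theorem noncomp_get {m : String} (h : isComp m = false) : apiComposites.get? m = none := by
  unfold isComp at h
  cases hq : apiComposites.get? m with
  | none => rfl
  | some ms => rw [hq] at h; simp at h

-- one-step unfoldings of A's loop
theorem loop_nil (result : PySem.Set String) : resolveLoop [] result = result := by
  rw [resolveLoop]

theorem loop_skip {s : String} {rest : List String} {result : PySem.Set String}
    (h : s ∈ result) :
    resolveLoop (s :: rest) result = resolveLoop rest result := by
  rw [resolveLoop]; simp [h]

theorem loop_comp {s : String} {rest : List String} {result : PySem.Set String} {ms : List String}
    (h : s ∉ result) (hc : apiComposites.get? s = some ms) :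
    resolveLoop (s :: rest) result = resolveLoop (ms.reverse ++ rest) result := by
  rw [resolveLoop]; simp [h]
  split <;> simp_all

theorem loop_leaf_deps {s : String} {rest : List String} {result : PySem.Set String} {ds : List String}
    (h : s ∉ result) (hc : apiComposites.get? s = none)
    (hd : apiDependencies.get? s = some ds) :
    resolveLoop (s :: rest) result = resolveLoop (ds.reverse ++ rest) (PySem.Set.add result s) := by
  rw [resolveLoop]; simp [h]
  split
  · simp_all
  · split <;> simp_all

theorem loop_leaf_none {s : String} {rest : List String} {result : PySem.Set String}
    (h : s ∉ result) (hc : apiComposites.get? s = none)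
    (hd : apiDependencies.get? s = none) :
    resolveLoop (s :: rest) result = resolveLoop rest (PySem.Set.add result s) := by
  rw [resolveLoop]; simp [h]
  split
  · simp_all
  · split <;> simp_all

-- ===== the main loop lemma for A =====
theorem loopMain : ∀ (n : Nat) (stack result : List String), (stack.map wS).sum ≤ n →
    Good result stack → result.Nodup →
    (∀ x ∈ result, x ∈ resolveLoop stack result) ∧
    (∀ x ∈ resolveLoop stack result, x ∈ result ∨ ∃ s ∈ stack, x ∈ clos s) ∧
    Good (resolveLoop stack result) [] ∧
    (∀ s ∈ stack, entry s (resolveLoop stack result)) ∧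
    (resolveLoop stack result).Nodup := by
  intro n
  induction n with
  | zero =>
    intro stack result hle hg hnd
    cases stack with
    | nil =>
      rw [loop_nil]
      exact ⟨fun x hx => hx, fun x hx => Or.inl hx, hg, fun s hs => absurd hs List.not_mem_nil, hnd⟩
    | cons s rest =>
      exfalso; have := wS_pos s
      simp only [List.map_cons, List.sum_cons] at hle; omega
  | succ n ih =>
    intro stack result hle hg hnd
    cases stack with
    | nil =>
      rw [loop_nil]
      exact ⟨fun x hx => hx, fun x hx => Or.inl hx, hg, fun s hs => absurd hs List.not_mem_nil, hnd⟩
    | cons s rest =>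
      by_cases hs : s ∈ result
      · -- service already in result: skipped
        rw [loop_skip hs]
        have hsR : s ∈ result := hs
        have hg' : Good result rest := by
          intro r hr
          refine ⟨(hg r hr).1, fun d hd => ?_⟩
          rcases (hg r hr).2 d hd with h | h
          · exact Or.inl h
          · cases h with
            | head => exact Or.inl hsR
            | tail _ h => exact Or.inr h
        have hle' : (rest.map wS).sum ≤ n := by
          have := wS_pos s
          simp only [List.map_cons, List.sum_cons] at hle; omega
        obtain ⟨a, b, c, d, e⟩ := ih rest result hle' hg' hnd
        refine ⟨a, ?_, c, ?_, e⟩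
        · intro x hx
          rcases b x hx with h | ⟨t, ht, hxt⟩
          · exact Or.inl h
          · exact Or.inr ⟨t, List.mem_cons_of_mem _ ht, hxt⟩
        · intro t ht
          cases ht with
          | head => exact entry_of_noncomp (hg s hsR).1 (a s hsR)
          | tail _ ht => exact d t ht
      · have hsnR : s ∉ result := hs
        cases hc : apiComposites.get? s with
        | some ms =>
          -- composite: expand members onto the stack
          rw [loop_comp hsnR hc]
          have hg' : Good result (ms.reverse ++ rest) := by
            intro r hr
            refine ⟨(hg r hr).1, fun d hd => ?_⟩
            rcases (hg r hr).2 d hd with h | h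
            · exact Or.inl h
            · cases h with
              | head =>
                exfalso
                have hnc := deps_noncomp hd
                unfold isComp at hnc; rw [hc] at hnc; simp at hnc
              | tail _ h => exact Or.inr (List.mem_append_right _ h)
          have hle' : (((ms.reverse ++ rest).map wS)).sum ≤ n := by
            have h1 := comp_w hc
            simp only [List.map_cons, List.sum_cons] at hle
            simp only [List.map_append, List.map_reverse, List.sum_append, List.sum_reverse]
            omega
          obtain ⟨a, b, c, d, e⟩ := ih _ result hle' hg' hnd
          refine ⟨a, ?_, c, ?_, e⟩
          · intro x hx
            rcases b x hx with h | ⟨t, ht, hxt⟩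
            · exact Or.inl h
            · rcases List.mem_append.1 ht with ht | ht
              · exact Or.inr ⟨s, List.mem_cons_self,
                  (clos_comp hc x).2 ⟨t, List.mem_reverse.1 ht, hxt⟩⟩
              · exact Or.inr ⟨t, List.mem_cons_of_mem _ ht, hxt⟩
          · intro t ht
            cases ht with
            | head =>
              refine (entry_comp hc).2 (fun m hm => ?_)
              have hdm := d m (List.mem_append_left _ (List.mem_reverse.2 hm))
              exact (entry_leaf (noncomp_get (members_noncomp hc hm))).1 hdm
            | tail _ ht => exact d t (List.mem_append_right _ ht)
        | none =>
          -- leaf: added to result, dependencies pushed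
          have hadd : PySem.Set.add result s = result ++ [s] := PySem.Set.add_of_not_mem hsnR
          have hnd2 : (result ++ [s]).Nodup := by
            refine List.Nodup.append hnd (List.nodup_singleton s) ?_
            intro a ha hb
            rw [List.mem_singleton] at hb
            exact hsnR (hb ▸ ha)
          have hgood2 : ∀ P, (∀ d ∈ depsOf s, d ∈ P) → (∀ d, d ∈ rest → d ∈ P) →
              Good (result ++ [s]) P := by
            intro P hdp hrp r hr
            rcases List.mem_append.1 hr with hr | hr
            · refine ⟨(hg r hr).1, fun d hd => ?_⟩
              rcases (hg r hr).2 d hd with h | h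
              · exact Or.inl (List.mem_append_left _ h)
              · cases h with
                | head => exact Or.inl (List.mem_append_right _ (List.mem_singleton_self _))
                | tail _ h => exact Or.inr (hrp _ h)
            · have : r = s := List.mem_singleton.1 hr
              subst this
              refine ⟨by unfold isComp; rw [hc]; rfl, fun d hd => Or.inr (hdp d hd)⟩
          cases hdp : apiDependencies.get? s with
          | some ds =>
            rw [loop_leaf_deps hsnR hc hdp, hadd]
            have hds : depsOf s = ds := by unfold depsOf; rw [hdp]; rfl
            have hg' : Good (result ++ [s]) (ds.reverse ++ rest) :=
              hgood2 _ (fun d hd => List.mem_append_left _ (List.mem_reverse.2 (hds ▸ hd)))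
                (fun d hd => List.mem_append_right _ hd)
            have hle' : (((ds.reverse ++ rest).map wS)).sum ≤ n := by
              have h1 := deps_w hdp
              simp only [List.map_cons, List.sum_cons] at hle
              simp only [List.map_append, List.map_reverse, List.sum_append, List.sum_reverse]
              omega
            obtain ⟨a, b, c, d, e⟩ := ih _ _ hle' hg' hnd2
            refine ⟨fun x hx => a x (List.mem_append_left _ hx), ?_, c, ?_, e⟩
            · intro x hx
              rcases b x hx with h | ⟨t, ht, hxt⟩
              · rcases List.mem_append.1 h with h | h
                · exact Or.inl h
                · have hxs : x = s := List.mem_singleton.1 h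
                  exact Or.inr ⟨s, List.mem_cons_self,
                    hxs ▸ (clos_leaf hc s).2 (Or.inl rfl)⟩
              · rcases List.mem_append.1 ht with ht | ht
                · exact Or.inr ⟨s, List.mem_cons_self,
                    (clos_leaf hc x).2 (Or.inr ⟨t, hds ▸ List.mem_reverse.1 ht, hxt⟩)⟩
                · exact Or.inr ⟨t, List.mem_cons_of_mem _ ht, hxt⟩
            · intro t ht
              cases ht with
              | head =>
                exact (entry_leaf hc).2
                  (a s (List.mem_append_right _ (List.mem_singleton_self _)))
              | tail _ ht => exact d t (List.mem_append_right _ ht)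
          | none =>
            rw [loop_leaf_none hsnR hc hdp, hadd]
            have hds : depsOf s = [] := by unfold depsOf; rw [hdp]; rfl
            have hg' : Good (result ++ [s]) rest :=
              hgood2 _ (fun d hd => by rw [hds] at hd; cases hd) (fun d hd => hd)
            have hle' : ((rest.map wS)).sum ≤ n := by
              have := wS_pos s
              simp only [List.map_cons, List.sum_cons] at hle; omega
            obtain ⟨a, b, c, d, e⟩ := ih _ _ hle' hg' hnd2
            refine ⟨fun x hx => a x (List.mem_append_left _ hx), ?_, c, ?_, e⟩
            · intro x hx
              rcases b x hx with h | ⟨t, ht, hxt⟩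
              · rcases List.mem_append.1 h with h | h
                · exact Or.inl h
                · have hxs : x = s := List.mem_singleton.1 h
                  exact Or.inr ⟨s, List.mem_cons_self,
                    hxs ▸ (clos_leaf hc s).2 (Or.inl rfl)⟩
              · exact Or.inr ⟨t, List.mem_cons_of_mem _ ht, hxt⟩
            · intro t ht
              cases ht with
              | head =>
                exact (entry_leaf hc).2
                  (a s (List.mem_append_right _ (List.mem_singleton_self _)))
              | tail _ ht => exact d t ht

theorem good_empty (P : List String) : Good [] P := by
  intro r hr; cases hr

-- membership characterisation of A's result
theorem Amem (services : List String) (x : String) :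
    x ∈ resolveLoop services.reverse PySem.Set.empty ↔ ∃ s ∈ services, x ∈ clos s := by
  obtain ⟨a, b, c, d, e⟩ :=
    loopMain ((services.reverse.map wS).sum) services.reverse PySem.Set.empty le_rfl
      (good_empty _) List.nodup_nil
  constructor
  · intro hx
    rcases b x hx with h | ⟨s, hs, hxs⟩
    · cases h
    · exact ⟨s, List.mem_reverse.1 hs, hxs⟩
  · rintro ⟨s, hs, hxs⟩
    exact clos_closed (wS s) s _ le_rfl c (d s (List.mem_reverse.2 hs)) x hxs

theorem A_nodup (services : List String) :
    (resolveLoop services.reverse PySem.Set.empty).Nodup :=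
  (loopMain ((services.reverse.map wS).sum) services.reverse PySem.Set.empty le_rfl
    (good_empty _) List.nodup_nil).2.2.2.2

-- ===== B-side lemmas: clos s has exactly the members of the precomputed table entry =====

theorem clos_simple {s : String} (h1 : apiComposites.get? s = none)
    (h2 : apiDependencies.get? s = none) (x : String) : x ∈ clos s ↔ x = s := by
  rw [clos_leaf h1]
  unfold depsOf; rw [h2]
  simp

theorem mem_clos_kinesis (x : String) : x ∈ clos "kinesis" ↔ x = "kinesis" :=
  clos_simple (by decide) (by decide) x

theorem mem_clos_dds (x : String) :
    x ∈ clos "dynamodbstreams" ↔ x ∈ ["dynamodbstreams", "kinesis"] := by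
  rw [clos_leaf (by decide)]
  have hd : depsOf "dynamodbstreams" = ["kinesis"] := by decide
  rw [hd]
  simp [mem_clos_kinesis]

theorem mem_clos_dynamodb (x : String) :
    x ∈ clos "dynamodb" ↔ x ∈ ["dynamodb", "dynamodbstreams", "kinesis"] := by
  rw [clos_leaf (by decide)]
  have hd : depsOf "dynamodb" = ["dynamodbstreams"] := by decide
  rw [hd]
  simp [mem_clos_dds]

theorem mem_clos_es (x : String) : x ∈ clos "es" ↔ x ∈ ["es", "opensearch"] := by
  rw [clos_leaf (by decide)]
  have hd : depsOf "es" = ["opensearch"] := by decide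
  rw [hd]
  simp [clos_simple (s := "opensearch") (by decide) (by decide)]

theorem mem_clos_cfn (x : String) :
    x ∈ clos "cloudformation" ↔ x ∈ ["cloudformation", "s3", "sts"] := by
  rw [clos_leaf (by decide)]
  have hd : depsOf "cloudformation" = ["s3", "sts"] := by decide
  rw [hd]
  simp [clos_simple (s := "s3") (by decide) (by decide),
    clos_simple (s := "sts") (by decide) (by decide)]

theorem mem_clos_lambda (x : String) :
    x ∈ clos "lambda" ↔ x ∈ ["lambda", "s3", "sqs", "sts"] := by
  rw [clos_leaf (by decide)]
  have hd : depsOf "lambda" = ["s3", "sqs", "sts"] := by decide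
  rw [hd]
  simp [clos_simple (s := "s3") (by decide) (by decide),
    clos_simple (s := "sqs") (by decide) (by decide),
    clos_simple (s := "sts") (by decide) (by decide)]

theorem mem_clos_firehose (x : String) :
    x ∈ clos "firehose" ↔ x ∈ ["firehose", "kinesis"] := by
  rw [clos_leaf (by decide)]
  have hd : depsOf "firehose" = ["kinesis"] := by decide
  rw [hd]
  simp [mem_clos_kinesis]

theorem mem_clos_transcribe (x : String) :
    x ∈ clos "transcribe" ↔ x ∈ ["transcribe", "s3"] := by
  rw [clos_leaf (by decide)]
  have hd : depsOf "transcribe" = ["s3"] := by decide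
  rw [hd]
  simp [clos_simple (s := "s3") (by decide) (by decide)]

theorem mem_clos_cognito (x : String) :
    x ∈ clos "cognito" ↔ x ∈ ["cognito-idp", "cognito-identity"] := by
  rw [clos_comp (show apiComposites.get? "cognito" = some ["cognito-idp", "cognito-identity"] by decide)]
  simp [clos_simple (s := "cognito-idp") (by decide) (by decide),
    clos_simple (s := "cognito-identity") (by decide) (by decide)]

theorem mem_clos_serverless (x : String) :
    x ∈ clos "serverless" ↔
      x ∈ ["cloudformation", "s3", "sts", "cloudwatch", "iam", "lambda", "sqs",
           "dynamodb", "dynamodbstreams", "kinesis", "apigateway"] := by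
  rw [clos_comp (show apiComposites.get? "serverless" =
    some ["cloudformation", "cloudwatch", "iam", "sts", "lambda", "dynamodb", "apigateway", "s3"]
    by decide)]
  simp [mem_clos_cfn, mem_clos_lambda, mem_clos_dynamodb,
    clos_simple (s := "cloudwatch") (by decide) (by decide),
    clos_simple (s := "iam") (by decide) (by decide),
    clos_simple (s := "sts") (by decide) (by decide),
    clos_simple (s := "apigateway") (by decide) (by decide),
    clos_simple (s := "s3") (by decide) (by decide)]
  tauto

-- the key lemma: A's per-service transitive closure has exactly the table's members
theorem clos_iff_table (s x : String) : x ∈ clos s ↔ x ∈ closTable s := by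
  by_cases h1 : s = "serverless"
  · subst h1; exact (mem_clos_serverless x).trans (by simp [closTable])
  by_cases h2 : s = "cognito"
  · subst h2; exact (mem_clos_cognito x).trans (by simp [closTable])
  by_cases h3 : s = "dynamodb"
  · subst h3; exact (mem_clos_dynamodb x).trans (by simp [closTable])
  by_cases h4 : s = "dynamodbstreams"
  · subst h4; exact (mem_clos_dds x).trans (by simp [closTable])
  by_cases h5 : s = "es"
  · subst h5; exact (mem_clos_es x).trans (by simp [closTable])
  by_cases h6 : s = "cloudformation"
  · subst h6; exact (mem_clos_cfn x).trans (by simp [closTable])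
  by_cases h7 : s = "lambda"
  · subst h7; exact (mem_clos_lambda x).trans (by simp [closTable])
  by_cases h8 : s = "firehose"
  · subst h8; exact (mem_clos_firehose x).trans (by simp [closTable])
  by_cases h9 : s = "transcribe"
  · subst h9; exact (mem_clos_transcribe x).trans (by simp [closTable])
  · have ht : closTable s = [s] := by
      unfold closTable
      rw [if_neg h1, if_neg h2, if_neg h3, if_neg h4, if_neg h5, if_neg h6, if_neg h7,
        if_neg h8, if_neg h9]
    have hc : apiComposites.get? s = none := by
      rw [comp_get, if_neg h2, if_neg h1]
    have hd : apiDependencies.get? s = none := by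
      rw [deps_get, if_neg h9, if_neg h8, if_neg h7, if_neg h6, if_neg h5, if_neg h4, if_neg h3]
    rw [ht, clos_simple hc hd]
    simp

-- membership and nodup of B's folded set
theorem Bfold_mem (xs : List String) (init : PySem.Set String) (x : String) :
    x ∈ xs.foldl (fun result s => PySem.Set.update result (closTable s)) init ↔
      x ∈ init ∨ ∃ s ∈ xs, x ∈ closTable s := by
  induction xs generalizing init with
  | nil => simp
  | cons y ys ih =>
    simp only [List.foldl_cons, ih, PySem.Set.mem_update, List.mem_cons]
    constructor
    · rintro (⟨h | h⟩ | ⟨s, hs, hx⟩)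
      · exact Or.inl h
      · exact Or.inr ⟨y, Or.inl rfl, h⟩
      · exact Or.inr ⟨s, Or.inr hs, hx⟩
    · rintro (h | ⟨s, rfl | hs, hx⟩)
      · exact Or.inl (Or.inl h)
      · exact Or.inl (Or.inr hx)
      · exact Or.inr ⟨s, hs, hx⟩

theorem Bfold_nodup (xs : List String) (init : PySem.Set String) (h : init.Nodup) :
    (xs.foldl (fun result s => PySem.Set.update result (closTable s)) init).Nodup := by
  induction xs generalizing init with
  | nil => exact h
  | cons y ys ih =>
    simp only [List.foldl_cons]
    exact ih _ (PySem.Set.nodup_update _ _ h)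

-- ===== VERDICT (by name: the statement is the Claim_ definition above) =====
theorem resolve_apis_spec : Claim_equal_resolve_apis := by
  intro services _
  unfold Spec_resolve_apis resolve_apis resolve_apis_alt
  have hperm : (PySem.List.sorted
      (services.foldl (fun result s => PySem.Set.update result (closTable s)) PySem.Set.empty)
      (fun x => x) false).Perm
      (resolveLoop services.reverse PySem.Set.empty) := by
    refine (PySem.List.sorted_perm _ _ _).trans ?_
    refine (List.perm_ext_iff_of_nodup (Bfold_nodup _ _ List.nodup_nil) (A_nodup services)).2 ?_
    intro a
    rw [Bfold_mem, Amem]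
    constructor
    · rintro (h | ⟨s, hs, hx⟩)
      · cases h
      · exact ⟨s, hs, (clos_iff_table s a).2 hx⟩
    · rintro ⟨s, hs, hx⟩
      exact Or.inr ⟨s, hs, (clos_iff_table s a).1 hx⟩
  exact PySem.List.sorted_id_eq_of_perm_of_pairwise _ _ hperm
    (PySem.List.sorted_pairwise _ _)
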